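-- pv_equiv track=rewrite | github.com/MrBrantCode/unitest_baseline | mut_generate/mist_train_cf/cf_62834/solution.py | count_and_sort_vowels
-- ===== SOURCE A (Python) =====
-- def count_and_sort_vowels(s):
--     vowels = "aeiouAEIOU"
--     result = []
--     counts = {}
--
--     for letter in s:
--         if letter in vowels and letter not in result:
--             result.append(letter)
--             counts[letter] = s.count(letter)
--
--     return result, counts
-- ===== SOURCE B (Python) =====
-- def count_and_sort_vowels(s):
--     vowels = "aeiouAEIOU"
--     present = sorted((v for v in vowels if v in s), key=s.find)
--     counts = {v: s.count(v) for v in present}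
--     return present, counts
-- ===== Notes on version B (the rewrite author's own statement) =====
-- stated objective: alternative
-- what changed: Instead of A's scan over s that deduplicates vowels on the fly (an O(n) s.count rescan per new vowel), B drives the computation off the fixed 10-letter vowel alphabet: it keeps the vowels present in s, sorts them by their first-occurrence index s.find(v), and reads both the ordered list and the counts dict from that sorted list.
import Mathlib
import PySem

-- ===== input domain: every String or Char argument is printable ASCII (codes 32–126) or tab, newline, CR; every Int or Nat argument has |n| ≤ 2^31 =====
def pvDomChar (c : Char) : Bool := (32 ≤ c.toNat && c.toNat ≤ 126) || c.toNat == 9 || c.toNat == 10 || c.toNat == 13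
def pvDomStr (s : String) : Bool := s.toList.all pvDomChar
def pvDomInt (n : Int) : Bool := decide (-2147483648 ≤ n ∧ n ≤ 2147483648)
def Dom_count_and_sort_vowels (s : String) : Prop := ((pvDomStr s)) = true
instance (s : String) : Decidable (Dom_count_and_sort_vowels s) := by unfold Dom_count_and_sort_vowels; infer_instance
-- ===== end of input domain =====

-- B replaces A's scan-and-dedup over s (with a full s.count rescan per new vowel) by a pass
-- over the fixed vowel alphabet sorted by first-occurrence index (alternative decomposition).

-- ===== PORT A =====
def count_and_sort_vowels (s : String) : List String × (List (String × Int)) :=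
  let vowels : String := "aeiouAEIOU"
  let st := s.toList.foldl
    (fun (st : List String × PySem.Dict String Int) letter =>
      let ls : String := String.mk [letter]
      if PySem.Str.isIn ls vowels && !(st.1.contains ls) then
        (st.1 ++ [ls], st.2.insert ls ((PySem.Str.count s ls : Int)))
      else st)
    ([], PySem.Dict.empty)
  (st.1, st.2.items)

-- ===== PORT B =====
def count_and_sort_vowels_alt (s : String) : List String × (List (String × Int)) :=
  let vowels : String := "aeiouAEIOU"
  let present : List String :=
    PySem.List.sorted
      ((vowels.toList.filter (fun v => PySem.Str.isIn (String.mk [v]) s)).map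
        (fun v => String.mk [v]))
      (fun v => PySem.Str.find s v) false
  let counts : PySem.Dict String Int :=
    present.foldl (fun d v => d.insert v ((PySem.Str.count s v : Int))) PySem.Dict.empty
  (present, counts.items)

-- ===== PRECONDITION & SPEC =====
def Spec_count_and_sort_vowels (s : String) (out : List String × (List (String × Int))) : Prop := out = count_and_sort_vowels_alt s
instance (s : String) (out : List String × (List (String × Int))) : Decidable (Spec_count_and_sort_vowels s out) := by unfold Spec_count_and_sort_vowels; infer_instance

-- ===== CLAIM (what is proved, stated in full; the proofs are below) =====
def Claim_equal_count_and_sort_vowels : Prop := ∀ (s : String), Dom_count_and_sort_vowels s → Spec_count_and_sort_vowels s (count_and_sort_vowels s)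

-- ===== LEMMAS AND PROOFS =====

@[simp] theorem pvToList_mk (l : List Char) : (String.mk l).toList = l :=
  ((String.ofList_eq.mp) rfl).symm

theorem pvMk1_injective : Function.Injective (fun c => String.mk [c]) := by
  intro a b h
  have := congrArg String.toList h
  simp only [pvToList_mk] at this
  exact List.singleton_injective this

-- The vowel test, the single-character map, and the items entry used below.
def pvVow (c : Char) : Bool := PySem.Str.isIn (String.mk [c]) "aeiouAEIOU"
def pvL (s : String) : List String := (s.toList.filter pvVow).map (fun c => String.mk [c])
def pvF (s : String) (k : String) : String × Int := (k, (PySem.Str.count s k : Int))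

-- A's loop body, named so the lemmas can speak about it (definitionally the port's lambda).
def pvStep (s : String) : (List String × PySem.Dict String Int) → Char → (List String × PySem.Dict String Int) :=
  fun st letter =>
    let ls : String := String.mk [letter]
    if PySem.Str.isIn ls "aeiouAEIOU" && !(st.1.contains ls) then
      (st.1 ++ [ls], st.2.insert ls ((PySem.Str.count s ls : Int)))
    else st

theorem pvUpdate_cons (r : PySem.Set String) (x : String) (xs : List String) :
    PySem.Set.update r (x :: xs) = PySem.Set.update (PySem.Set.add r x) xs := rfl

-- A's loop, characterised: result is the first-occurrence set; counts lists it with s.count.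
theorem pvLoopA (s : String) :
    ∀ (l : List Char) (r : List String) (d : PySem.Dict String Int),
      d.items = r.map (pvF s) →
      l.foldl (pvStep s) (r, d)
      = (PySem.Set.update r ((l.filter pvVow).map (fun c => String.mk [c])),
         PySem.Dict.mk ((PySem.Set.update r ((l.filter pvVow).map (fun c => String.mk [c]))).map (pvF s))) := by
  intro l
  induction l with
  | nil =>
      intro r d hd
      obtain ⟨its⟩ := d
      have hd2 : its = r.map (pvF s) := hd
      subst hd2
      rfl
  | cons a t ih =>
      intro r d hd
      rw [List.foldl_cons]
      by_cases hv : pvVow a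
      · have hbv : PySem.Str.isIn (String.mk [a]) "aeiouAEIOU" = true := hv
        rw [List.filter_cons_of_pos hv, List.map_cons, pvUpdate_cons]
        by_cases hr : r.contains (String.mk [a]) = true
        · have hc : PySem.Set.contains r (String.mk [a]) = true := by
            rw [PySem.Set.contains_eq_listContains]; exact hr
          have hadd : PySem.Set.add r (String.mk [a]) = r := by
            unfold PySem.Set.add; rw [hc]; simp
          have hstep : pvStep s (r, d) a = (r, d) := by
            unfold pvStep
            simp only [hbv, hr, Bool.not_true, Bool.and_false, Bool.false_eq_true, if_false]
          rw [hstep, hadd]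
          exact ih r d hd
        · have hrf : r.contains (String.mk [a]) = false := by simpa using hr
          have hc : PySem.Set.contains r (String.mk [a]) = false := by
            rw [PySem.Set.contains_eq_listContains]; exact hrf
          have hadd : PySem.Set.add r (String.mk [a]) = r ++ [String.mk [a]] := by
            unfold PySem.Set.add; rw [hc]; simp
          have hdc : d.contains (String.mk [a]) = false := by
            obtain ⟨its⟩ := d
            have hd2 : its = r.map (pvF s) := hd
            subst hd2
            simp only [PySem.Dict.contains_eq_decide_mem_keys, PySem.Dict.keys_mk,
              decide_eq_false_iff_not]
            intro hmem
            simp only [List.map_map, List.mem_map, Function.comp, pvF] at hmem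
            obtain ⟨k, hk, hke⟩ := hmem
            rw [List.contains_eq_mem, decide_eq_false_iff_not] at hrf
            exact hrf (hke ▸ hk)
          have hstep : pvStep s (r, d) a
              = (r ++ [String.mk [a]], d.insert (String.mk [a]) ((PySem.Str.count s (String.mk [a]) : Int))) := by
            unfold pvStep
            simp only [hbv, hrf, Bool.not_false, Bool.and_true, if_true]
          rw [hstep, hadd]
          exact ih (r ++ [String.mk [a]]) _
            (by rw [PySem.Dict.items_insert_of_not_contains _ _ hdc, hd,
                  List.map_append]; rfl)
      · have hbv : PySem.Str.isIn (String.mk [a]) "aeiouAEIOU" = false := by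
          simpa [pvVow] using hv
        have hvf : pvVow a = false := by simpa using hv
        rw [List.filter_cons_of_neg (by simp [hvf])]
        have hstep : pvStep s (r, d) a = (r, d) := by
          unfold pvStep
          simp only [hbv, Bool.false_and, Bool.false_eq_true, if_false]
        rw [hstep]
        exact ih r d hd

-- A one-element list is an infix exactly when its element occurs.
theorem pvSingleton_infix (c : Char) (xs : List Char) : [c] <:+: xs ↔ c ∈ xs := by
  constructor
  · intro h
    exact h.sublist.subset (List.mem_singleton_self c)
  · intro h
    obtain ⟨t1, t2, rfl⟩ := List.mem_iff_append.mp h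
    exact ⟨t1, t2, by simp⟩

theorem pvIsIn_singleton (c : Char) (t : String) :
    PySem.Str.isIn (String.mk [c]) t = true ↔ c ∈ t.toList := by
  rw [PySem.Str.isIn_iff_infix, pvToList_mk, pvSingleton_infix]

-- A one-element list is a prefix exactly when it is the head.
theorem pvSingleton_prefix (c : Char) (xs : List Char) : [c] <+: xs ↔ xs.head? = some c := by
  cases xs with
  | nil => simp
  | cons a t =>
      rw [List.cons_prefix_cons]
      simp [eq_comm]

-- The first index with xs[n] = c is idxOf.
theorem pvIdxOf_eq {α : Type} [BEq α] [LawfulBEq α] (xs : List α) (c : α) :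
    ∀ (n : Nat), xs[n]? = some c → (∀ i < n, xs[i]? ≠ some c) → xs.idxOf c = n := by
  induction xs with
  | nil => intro n h _; simp at h
  | cons a t ih =>
      intro n h hmin
      cases n with
      | zero =>
          simp only [List.getElem?_cons_zero, Option.some.injEq] at h
          subst h; exact List.idxOf_cons_self
      | succ m =>
          have ha : a ≠ c := by
            intro he
            exact hmin 0 (Nat.succ_pos m) (by simp [he])
          rw [List.idxOf_cons_ne t ha]
          have := ih m (by simpa using h)
            (fun i hi => by
              have := hmin (i + 1) (Nat.succ_lt_succ hi)
              simpa using this)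
          omega

-- Python's s.find(c) for a present character c is the first index of c.
theorem pvFind_eq_idxOf (s : String) (c : Char) (hc : c ∈ s.toList) :
    PySem.Str.find s (String.mk [c]) = (s.toList.idxOf c : Int) := by
  rw [PySem.Str.find_eq, pvToList_mk]
  have hnn : 0 ≤ PySem.Chars.find s.toList [c] :=
    (PySem.Chars.find_nonneg_iff _ _).mpr ((pvSingleton_infix c _).mpr hc)
  obtain ⟨hpre, hmin⟩ := PySem.Chars.find_spec hnn
  have hidx : s.toList.idxOf c = (PySem.Chars.find s.toList [c]).toNat := by
    apply pvIdxOf_eq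
    · rw [← List.head?_drop]
      exact (pvSingleton_prefix c _).mp hpre
    · intro i hi hsome
      exact hmin i hi ((pvSingleton_prefix c _).mpr (by rw [List.head?_drop]; exact hsome))
  rw [hidx]
  omega

-- idxOf through an injective map.
theorem pvIdxOf_map {α β : Type} [BEq α] [LawfulBEq α] [BEq β] [LawfulBEq β]
    (f : α → β) (hf : Function.Injective f) (xs : List α) (c : α) :
    (xs.map f).idxOf (f c) = xs.idxOf c := by
  induction xs with
  | nil => rfl
  | cons a t ih =>
      by_cases h : a = c
      · subst h; simp
      · rw [List.map_cons, List.idxOf_cons_ne _ (fun he => h (hf he)),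
          List.idxOf_cons_ne _ h, ih]

-- Elements of set(xs) appear in first-occurrence order: idxOf is strictly increasing.
theorem pvPairwise_ofList {α : Type} [BEq α] [LawfulBEq α] (xs : List α) :
    (PySem.Set.ofList xs : List α).Pairwise (fun a b => xs.idxOf a < xs.idxOf b) := by
  induction xs with
  | nil => simp [PySem.Set.ofList]
  | cons x t ih =>
      rw [PySem.Set.ofList_cons]
      constructor
      · intro b hb
        obtain ⟨_, hbne⟩ := (PySem.Set.mem_discard _ _ _).mp hb
        rw [List.idxOf_cons_self, List.idxOf_cons_ne _ (Ne.symm hbne)]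
        exact Nat.succ_pos _
      · have hdis : (PySem.Set.ofList t).discard x
            = (PySem.Set.ofList t : List α).filter (fun y => !y == x) :=
          PySem.Set.discard.eq_1 _ _
        rw [hdis]
        refine List.Pairwise.imp_of_mem ?_ ((ih.filter _))
        intro a b ha hb hab
        have hane : a ≠ x := by simpa using (List.mem_filter.mp ha).2
        have hbne : b ≠ x := by simpa using (List.mem_filter.mp hb).2
        rw [List.idxOf_cons_ne _ (Ne.symm hane), List.idxOf_cons_ne _ (Ne.symm hbne)]
        omega

-- First-occurrence order survives removing a filter: indices in the filtered list order
-- the same way as indices in the full list.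
theorem pvIdxOf_filter_lt {α : Type} [BEq α] [LawfulBEq α] (p : α → Bool) :
    ∀ (l : List α) (a b : α), a ∈ l.filter p → b ∈ l.filter p →
      (l.filter p).idxOf a < (l.filter p).idxOf b → l.idxOf a < l.idxOf b := by
  intro l
  induction l with
  | nil => intro a b ha _ _; simp at ha
  | cons c t ih =>
      intro a b ha hb hlt
      by_cases hc : p c
      · rw [List.filter_cons_of_pos hc] at ha hb hlt
        by_cases hac : a = c
        · subst hac
          have hbne : b ≠ a := by
            intro he; subst he; omega
          rw [List.idxOf_cons_self, List.idxOf_cons_ne _ (Ne.symm hbne)]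
          exact Nat.succ_pos _
        · have hbne : b ≠ c := by
            intro he; subst he
            rw [List.idxOf_cons_self] at hlt; omega
          rw [List.idxOf_cons_ne _ (Ne.symm hac), List.idxOf_cons_ne _ (Ne.symm hbne)] at hlt
          have ha' : a ∈ t.filter p := by
            rcases List.mem_cons.mp ha with h | h
            · exact absurd h hac
            · exact h
          have hb' : b ∈ t.filter p := by
            rcases List.mem_cons.mp hb with h | h
            · exact absurd h hbne
            · exact h
          have := ih a b ha' hb' (by omega)
          rw [List.idxOf_cons_ne _ (Ne.symm hac), List.idxOf_cons_ne _ (Ne.symm hbne)]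
          omega
      · rw [List.filter_cons_of_neg hc] at ha hb hlt
        have hane : a ≠ c := by
          intro he; subst he
          exact hc ((List.mem_filter.mp ha).2)
        have hbne : b ≠ c := by
          intro he; subst he
          exact hc ((List.mem_filter.mp hb).2)
        have := ih a b ha hb hlt
        rw [List.idxOf_cons_ne _ (Ne.symm hane), List.idxOf_cons_ne _ (Ne.symm hbne)]
        omega

-- B's unsorted candidate list.
def pvP (s : String) : List String :=
  (("aeiouAEIOU".toList.filter (fun v => PySem.Str.isIn (String.mk [v]) s)).map
    (fun v => String.mk [v]))

-- membership in A's first-occurrence set = membership in B's candidate list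
theorem pvMem_iff (s : String) (a : String) :
    a ∈ (PySem.Set.ofList (pvL s) : List String) ↔ a ∈ pvP s := by
  rw [PySem.Set.mem_ofList]
  unfold pvL pvP
  simp only [List.mem_map, List.mem_filter]
  constructor
  · rintro ⟨c, ⟨hcs, hcv⟩, rfl⟩
    exact ⟨c, ⟨(pvIsIn_singleton c _).mp hcv, (pvIsIn_singleton c s).mpr hcs⟩, rfl⟩
  · rintro ⟨c, ⟨hcv, hcs⟩, rfl⟩
    exact ⟨c, ⟨(pvIsIn_singleton c s).mp hcs, (pvIsIn_singleton c _).mpr hcv⟩, rfl⟩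

-- the main ordering fact: A's first-occurrence set IS B's candidates sorted by s.find
theorem pvSorted_eq (s : String) :
    PySem.List.sorted (pvP s) (fun v => PySem.Str.find s v) false
      = (PySem.Set.ofList (pvL s) : List String) := by
  apply PySem.List.sorted_eq_of_perm_of_pairwise_lt
  · -- permutation: both are nodup with the same members
    refine (List.perm_ext_iff_of_nodup (PySem.Set.nodup_ofList _) ?_).mpr (pvMem_iff s)
    exact (List.Nodup.filter _ (by decide)).map pvMk1_injective
  · -- strict key-increase along A's set
    refine List.Pairwise.imp_of_mem ?_ (pvPairwise_ofList (pvL s))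
    intro a b ha hb hab
    rw [PySem.Set.mem_ofList] at ha hb
    unfold pvL at ha hb hab
    obtain ⟨c, hc, rfl⟩ := List.mem_map.mp ha
    obtain ⟨d, hd, rfl⟩ := List.mem_map.mp hb
    rw [pvIdxOf_map _ pvMk1_injective, pvIdxOf_map _ pvMk1_injective] at hab
    have hlt := pvIdxOf_filter_lt pvVow s.toList c d hc hd hab
    have hcs : c ∈ s.toList := (List.mem_filter.mp hc).1
    have hds : d ∈ s.toList := (List.mem_filter.mp hd).1
    rw [pvFind_eq_idxOf s c hcs, pvFind_eq_idxOf s d hds]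
    omega

-- ===== VERDICT (by name: the statement is the Claim_ definition above) =====
theorem count_and_sort_vowels_spec : Claim_equal_count_and_sort_vowels := by
  intro s _
  unfold Spec_count_and_sort_vowels count_and_sort_vowels count_and_sort_vowels_alt
  show ((s.toList.foldl (pvStep s) ([], PySem.Dict.empty)).1,
        (s.toList.foldl (pvStep s) ([], PySem.Dict.empty)).2.items)
     = (PySem.List.sorted (pvP s) (fun v => PySem.Str.find s v) false,
        ((PySem.List.sorted (pvP s) (fun v => PySem.Str.find s v) false).foldl
          (fun d v => d.insert v ((PySem.Str.count s v : Int))) PySem.Dict.empty).items)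
  rw [pvLoopA s s.toList [] PySem.Dict.empty rfl]
  have hupd : PySem.Set.update ([] : List String) ((s.toList.filter pvVow).map (fun c => String.mk [c]))
      = PySem.Set.ofList (pvL s) := by
    rw [PySem.Set.ofList_eq_foldl]; rfl
  rw [hupd, pvSorted_eq s]
  refine Prod.ext rfl ?_
  show (PySem.Dict.mk ((PySem.Set.ofList (pvL s)).map (pvF s))).items = _
  rw [PySem.Dict.items_foldl_insert_fresh ((PySem.Set.ofList (pvL s) : List String))
      (fun v => v) (fun v => ((PySem.Str.count s v : Int))) PySem.Dict.empty
      (fun a _ => rfl)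
      (by simp [PySem.Set.nodup_ofList (pvL s)])]
  rfl
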